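-- pv_equiv track=rewrite | github.com/maniac-en/pyssg | src/core/markdown_functions.py | get_non_codeblocks
-- ===== SOURCE A (Python) =====
-- from typing import List, Tuple
--
-- def get_non_codeblocks(text: str) -> List[str]:
--     """
--     Extract non-code blocks from a given text by splitting on newlines.
--
--     This function splits the input text into blocks by newlines. It strips any leading
--     or trailing whitespace from each block and removes any empty blocks created by
--     excessive newlines.
--
--     Parameters:
--     text (str): The input text string to be split into non-code blocks.
--
--     Returns:
--     List[str]: A list of non-code block strings, with leading and trailing whitespace removed.
--     """
--     blocks = list()
--     lines = text.split("\n")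
--     current_block = []
--
--     def add_block():
--         if current_block:
--             blocks.append("\n".join(current_block).strip())
--             current_block.clear()
--
--     for line in lines:
--         stripped_line = line.strip()
--         if not stripped_line:
--             add_block()
--         else:
--             current_block.append(stripped_line)
--
--     add_block()  # Add the last block if there's any
--
--     return blocks
-- ===== SOURCE B (Python) =====
-- def get_non_codeblocks(text: str):
--     """Group consecutive non-blank (stripped) lines into blocks in one grouping pass."""
--     lines = [l.strip() for l in text.split("\n")]
--     blocks = []
--     while lines:
--         if lines[0]:
--             k = 0
--             while k < len(lines) and lines[k]:
--                 k += 1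
--             blocks.append("\n".join(lines[:k]).strip())
--             lines = lines[k:]
--         else:
--             lines = lines[1:]
--     return blocks
-- ===== Notes on version B (the rewrite author's own statement) =====
-- stated objective: alternative
-- what changed: Replaces A's mutable current_block accumulator with add_block flush helper by a pre-stripping map followed by run-grouping: each maximal run of non-blank stripped lines is taken as a whole (takeWhile/dropWhile style) and joined into a block.
import Mathlib
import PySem

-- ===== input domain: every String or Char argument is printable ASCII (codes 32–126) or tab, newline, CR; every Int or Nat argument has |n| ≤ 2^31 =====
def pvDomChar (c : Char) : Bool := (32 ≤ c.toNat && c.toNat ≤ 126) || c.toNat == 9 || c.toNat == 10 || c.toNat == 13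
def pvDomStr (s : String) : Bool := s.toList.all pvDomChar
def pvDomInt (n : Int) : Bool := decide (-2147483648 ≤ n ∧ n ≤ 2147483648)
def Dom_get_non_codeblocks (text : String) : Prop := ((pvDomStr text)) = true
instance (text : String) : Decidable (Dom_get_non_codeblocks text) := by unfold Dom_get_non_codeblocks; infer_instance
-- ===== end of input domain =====

-- B replaces A's mutable current_block accumulator + add_block flush helper by a
-- pre-stripping map followed by run-grouping (takeWhile/dropWhile over runs of
-- non-blank lines); objective: alternative decomposition, same O(n) cost.

-- ===== PORT A =====
-- add_block: flush the pending current_block into blocks (if nonempty)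
def pvAFlush (st : List String × List String) : List String × List String :=
  if st.2 = [] then st
  else (st.1 ++ [PySem.Str.strip (PySem.Str.join "\n" st.2)], [])

-- body of A's for-loop: state = (blocks, current_block)
def pvAStep (st : List String × List String) (line : String) : List String × List String :=
  let stripped_line := PySem.Str.strip line
  if stripped_line = "" then pvAFlush st
  else (st.1, st.2 ++ [stripped_line])

def get_non_codeblocks (text : String) : List String :=
  let lines := (PySem.Str.split? text "\n").getD []
  (pvAFlush (lines.foldl pvAStep ([], []))).1

-- ===== PORT B =====
-- group the (already stripped) lines into maximal runs of non-blank lines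
def pvBGo : List String → List String
  | [] => []
  | l :: ls =>
    if l = "" then pvBGo ls
    else PySem.Str.strip (PySem.Str.join "\n" ((l :: ls).takeWhile (· ≠ ""))) ::
         pvBGo ((l :: ls).dropWhile (· ≠ ""))
termination_by ls => ls.length
decreasing_by
  · simp
  · have h1 : List.dropWhile (fun x => decide (x ≠ "")) (l :: ls) = List.dropWhile (fun x => decide (x ≠ "")) ls := by
      simp [List.dropWhile_cons]; intro h; exact absurd h (by assumption)
    have h2 := List.length_dropWhile_le (p := fun x => decide (x ≠ "")) ls
    simp only [h1, List.length_cons]; omega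

def get_non_codeblocks_alt (text : String) : List String :=
  pvBGo (((PySem.Str.split? text "\n").getD []).map PySem.Str.strip)

-- ===== PRECONDITION & SPEC =====
def Spec_get_non_codeblocks (text : String) (out : List String) : Prop := out = get_non_codeblocks_alt text
instance (text : String) (out : List String) : Decidable (Spec_get_non_codeblocks text out) := by unfold Spec_get_non_codeblocks; infer_instance

-- ===== CLAIM (what is proved, stated in full; the proofs are below) =====
def Claim_equal_get_non_codeblocks : Prop := ∀ (text : String), Dom_get_non_codeblocks text → Spec_get_non_codeblocks text (get_non_codeblocks text)

-- ===== LEMMAS AND PROOFS =====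

-- proof-side intermediate: A's loop seen over pre-stripped lines with explicit pending block
def pvGoC (cur : List String) : List String → List String
  | [] => if cur = [] then [] else [PySem.Str.strip (PySem.Str.join "\n" cur)]
  | l :: ls =>
    if l = "" then
      (if cur = [] then [] else [PySem.Str.strip (PySem.Str.join "\n" cur)]) ++ pvGoC [] ls
    else pvGoC (cur ++ [l]) ls

lemma pvA_loop (ls : List String) : ∀ (blocks cur : List String),
    (pvAFlush (ls.foldl pvAStep (blocks, cur))).1 = blocks ++ pvGoC cur (ls.map PySem.Str.strip) := by
  induction ls with
  | nil =>
    intro blocks cur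
    by_cases h : cur = [] <;> simp [pvAFlush, pvGoC, h]
  | cons line rest ih =>
    intro blocks cur
    simp only [List.foldl_cons, List.map_cons]
    by_cases h : PySem.Str.strip line = ""
    · by_cases hc : cur = []
      · subst hc
        have e1 : pvAStep (blocks, []) line = (blocks, []) := by simp [pvAStep, h, pvAFlush]
        rw [e1, ih]
        simp [pvGoC, h]
      · have e1 : pvAStep (blocks, cur) line
            = (blocks ++ [PySem.Str.strip (PySem.Str.join "\n" cur)], []) := by
          simp [pvAStep, h, pvAFlush, hc]
        rw [e1, ih]
        simp [pvGoC, h, hc]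
    · have e1 : pvAStep (blocks, cur) line = (blocks, cur ++ [PySem.Str.strip line]) := by
        simp [pvAStep, h]
      rw [e1, ih]
      simp [pvGoC, h]

lemma pvGoC_ne (ls : List String) : ∀ (cur : List String), cur ≠ [] →
    pvGoC cur ls =
      PySem.Str.strip (PySem.Str.join "\n" (cur ++ ls.takeWhile (· ≠ ""))) ::
        pvGoC [] (ls.dropWhile (· ≠ "")) := by
  induction ls with
  | nil => intro cur hc; simp [pvGoC, hc]
  | cons l rest ih =>
    intro cur hc
    by_cases h : l = ""
    · simp [pvGoC, h, hc, List.takeWhile, List.dropWhile]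
    · have := ih (cur ++ [l]) (by simp)
      simp [pvGoC, h, this, List.takeWhile, List.dropWhile, List.append_assoc]

lemma pvGoC_nil_eq : ∀ (n : ℕ) (ls : List String), ls.length ≤ n → pvGoC [] ls = pvBGo ls := by
  intro n
  induction n with
  | zero =>
    intro ls h
    have : ls = [] := List.eq_nil_of_length_eq_zero (Nat.le_zero.mp h)
    simp [this, pvGoC, pvBGo]
  | succ n ih =>
    intro ls h
    cases ls with
    | nil => simp [pvGoC, pvBGo]
    | cons l rest =>
      by_cases hl : l = ""
      · simp only [pvGoC, pvBGo, hl, if_pos]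
        simp only [List.length_cons, Nat.succ_le_succ_iff] at h
        exact (by simpa using ih rest h)
      · have hrun := pvGoC_ne rest [l] (by simp)
        have hdrop : (rest.dropWhile (· ≠ "")).length ≤ n := by
          have := List.length_dropWhile_le (p := fun x => decide (x ≠ "")) rest
          simp only [List.length_cons, Nat.succ_le_succ_iff] at h
          omega
        have h1 : pvGoC [] (l :: rest) = pvGoC [l] rest := by simp [pvGoC, hl]
        rw [h1, hrun, ih _ hdrop]
        simp [pvBGo, hl]

-- ===== VERDICT (by name: the statement is the Claim_ definition above) =====
theorem get_non_codeblocks_spec : Claim_equal_get_non_codeblocks := by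
  intro text _
  show get_non_codeblocks text = get_non_codeblocks_alt text
  unfold get_non_codeblocks get_non_codeblocks_alt
  rw [pvA_loop]
  simp [pvGoC_nil_eq (((PySem.Str.split? text "\n").getD []).map PySem.Str.strip).length _ le_rfl]
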